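-- pv_equiv track=rewrite | github.com/adam-edison/knausj_talon | text/caret-navigation/caret_navigation.py | regex_escape
-- ===== SOURCE A (Python) =====
-- def regex_escape(text):
--     result = ""
--
--     for character in list(text):
--         if character in ".([{":
--             result += f"\\{character}"
--         else:
--             result += character
--
--     return result
-- ===== SOURCE B (Python) =====
-- def regex_escape(text):
--     for ch in ".([{":
--         text = text.replace(ch, "\\" + ch)
--     return text
-- ===== Notes on version B (the rewrite author's own statement) =====
-- stated objective: idiomatic
-- what changed: Replaces A's single per-character branch-and-concatenate loop with four staged whole-string str.replace passes, one per special character (correct because the inserted backslash and the escaped character are never rewritten by a later pass).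
import Mathlib
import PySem

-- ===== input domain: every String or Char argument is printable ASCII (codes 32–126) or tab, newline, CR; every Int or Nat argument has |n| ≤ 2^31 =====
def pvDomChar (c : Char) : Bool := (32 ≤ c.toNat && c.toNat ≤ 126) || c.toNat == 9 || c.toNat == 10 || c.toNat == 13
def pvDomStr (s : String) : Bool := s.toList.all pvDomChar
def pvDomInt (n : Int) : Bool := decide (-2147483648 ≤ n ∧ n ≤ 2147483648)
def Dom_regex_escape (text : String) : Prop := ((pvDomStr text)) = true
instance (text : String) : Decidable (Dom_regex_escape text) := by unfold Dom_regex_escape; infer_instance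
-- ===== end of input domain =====

-- B replaces A's single per-character branch-and-append loop with four staged whole-string
-- str.replace passes, one per special character (idiomatic; return value only).

-- ===== PORT A =====
-- literal port: for character in list(text): result += "\\"+c if c in ".([{" else c
def regex_escape (text : String) : String :=
  text.toList.foldl
    (fun result character =>
      if (".([{".toList.contains character) then result ++ "\\" ++ character.toString
      else result ++ character.toString)
    ""

-- ===== PORT B =====
-- literal port of Source B: for ch in ".([{": text = text.replace(ch, "\\" + ch)
def regex_escape_alt (text : String) : String :=
  ".([{".toList.foldl
    (fun t ch => PySem.Str.replace t ch.toString ("\\" ++ ch.toString))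
    text

-- ===== PRECONDITION & SPEC =====
def Spec_regex_escape (text : String) (out : String) : Prop := out = regex_escape_alt text
instance (text : String) (out : String) : Decidable (Spec_regex_escape text out) := by unfold Spec_regex_escape; infer_instance

-- ===== CLAIM (what is proved, stated in full; the proofs are below) =====
def Claim_equal_regex_escape : Prop := ∀ (text : String), Dom_regex_escape text → Spec_regex_escape text (regex_escape text)

-- ===== LEMMAS AND PROOFS =====

-- per-character effect of a single-char replace
def pvRepl (o : Char) (new : List Char) (l : List Char) : List Char :=
  l.flatMap (fun c => if c = o then new else [c])

theorem pvGo_single (o : Char) (new : List Char) (l acc : List Char) :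
    PySem.Chars.replace.go [o] new l.length l acc
      = acc.reverse ++ pvRepl o new l := by
  induction l generalizing acc with
  | nil => rw [PySem.Chars.replace.go.eq_def]; simp [pvRepl]
  | cons c t ih =>
    rw [List.length_cons, PySem.Chars.replace.go.eq_def]
    by_cases h : c = o
    · subst h
      simp only [List.isPrefixOf, beq_self_eq_true, Bool.true_and,
        if_true, List.length_cons, List.length_nil, List.drop_succ_cons, List.drop_zero]
      rw [ih]
      simp [pvRepl]
    · have hb : ([o].isPrefixOf (c :: t)) = false := by
        simp [List.isPrefixOf, Ne.symm h]
      simp only [hb, Bool.false_eq_true, if_false]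
      rw [ih]
      simp [pvRepl, h]

theorem pvReplace_single (o : Char) (new : List Char) (l : List Char) :
    PySem.Chars.replace l [o] new = pvRepl o new l := by
  simpa using pvGo_single o new l []

-- A's fold, read at the character level
theorem pvA_toList (l : List Char) (r : String) :
    (l.foldl
      (fun result character =>
        if (".([{".toList.contains character) then result ++ "\\" ++ character.toString
        else result ++ character.toString)
      r).toList
      = r.toList ++ l.flatMap (fun c => if (".([{".toList.contains c) then ['\\', c] else [c]) := by
  induction l generalizing r with
  | nil => simp
  | cons c t ih =>
    simp only [List.foldl, List.flatMap_cons]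
    rw [ih]
    by_cases h : c = '.' ∨ c = '(' ∨ c = '[' ∨ c = '{' <;> simp [h]

-- the four staged per-character maps compose to A's single per-character map
theorem pvCompose (c : Char) :
    pvRepl '{' ['\\', '{'] (pvRepl '[' ['\\', '['] (pvRepl '(' ['\\', '('] (pvRepl '.' ['\\', '.'] [c])))
      = (if (".([{".toList.contains c) then ['\\', c] else [c]) := by
  by_cases h1 : c = '.' <;> by_cases h2 : c = '(' <;> by_cases h3 : c = '[' <;> by_cases h4 : c = '{' <;>
    simp_all [pvRepl]

theorem pvRepl_flatMap (o : Char) (new : List Char) (f : Char → List Char) (l : List Char) :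
    pvRepl o new (l.flatMap f) = l.flatMap (fun c => pvRepl o new (f c)) := by
  simp [pvRepl, List.flatMap_assoc]

-- ===== VERDICT (by name: the statement is the Claim_ definition above) =====
theorem regex_escape_spec : Claim_equal_regex_escape := by
  intro text _
  unfold Spec_regex_escape regex_escape regex_escape_alt
  apply String.ext
  rw [pvA_toList]
  show _ = (PySem.Str.replace (PySem.Str.replace (PySem.Str.replace (PySem.Str.replace text
      ('.'.toString) ("\\" ++ '.'.toString)) ('('.toString) ("\\" ++ '('.toString))
      ('['.toString) ("\\" ++ '['.toString)) ('{'.toString) ("\\" ++ '{'.toString)).toList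
  simp only [PySem.Str.toList_replace]
  have hm : ∀ c : Char, (c.toString).toList = [c] := fun c => by simp
  have hn : ∀ c : Char, (("\\" : String) ++ c.toString).toList = ['\\', c] := fun c => by
    simp
  rw [hm, hm, hm, hm, hn, hn, hn, hn]
  rw [pvReplace_single, pvReplace_single, pvReplace_single, pvReplace_single]
  have hstaged : ∀ l : List Char,
      pvRepl '{' ['\\', '{'] (pvRepl '[' ['\\', '['] (pvRepl '(' ['\\', '('] (pvRepl '.' ['\\', '.'] l)))
        = l.flatMap (fun c =>
            pvRepl '{' ['\\', '{'] (pvRepl '[' ['\\', '['] (pvRepl '(' ['\\', '('] (pvRepl '.' ['\\', '.'] [c])))) := by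
    intro l
    conv_lhs => rw [show l = l.flatMap (fun c => [c]) from by simp]
    rw [pvRepl_flatMap, pvRepl_flatMap, pvRepl_flatMap, pvRepl_flatMap]
  rw [hstaged]
  simp only [pvCompose]
  simp
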